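-- pv_equiv track=rewrite | github.com/artachobruno/Athlete-Space---Backend | app/utils/title_utils.py | is_generic_strava_title
-- ===== SOURCE A (Python) =====
-- _TIME_PREFIXES = frozenset({"morning", "lunch", "afternoon", "evening", "night"})
--
-- _ACTIVITY_TYPES = frozenset({
--     "run", "ride", "swim", "walk", "hike", "workout",
--     "weight training", "yoga", "crossfit", "elliptical",
--     "stair stepper", "rowing", "ski", "snowboard",
--     "ice skate", "kayak", "surf", "windsurf", "kitesurf",
-- })
--
-- _GENERIC_EXACT = frozenset({
--     "run", "running", "ride", "cycling", "swim", "swimming",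
--     "activity", "workout", "exercise", "training",
-- })
--
-- def is_generic_strava_title(title: str | None) -> bool:
--     """Check if title is a generic Strava-style auto-generated title.
--
--     Strava generates titles like "Morning Run", "Lunch Ride", "Afternoon Swim".
--     These should be replaced with more descriptive titles.
--
--     Args:
--         title: Title to check
--
--     Returns:
--         True if title is generic/auto-generated
--     """
--     if not title:
--         return True
--
--     title_lower = title.lower().strip()
--
--     # Check for "Time Activity" pattern (e.g., "Morning Run", "Lunch Swim")
--     for prefix in _TIME_PREFIXES:
--         for activity in _ACTIVITY_TYPES:
--             if title_lower == f"{prefix} {activity}":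
--                 return True
--
--     # Also catch simple generic titles
--     return title_lower in _GENERIC_EXACT
-- ===== SOURCE B (Python) =====
-- _TIME_PREFIXES = frozenset({"morning", "lunch", "afternoon", "evening", "night"})
--
-- _ACTIVITY_TYPES = frozenset({
--     "run", "ride", "swim", "walk", "hike", "workout",
--     "weight training", "yoga", "crossfit", "elliptical",
--     "stair stepper", "rowing", "ski", "snowboard",
--     "ice skate", "kayak", "surf", "windsurf", "kitesurf",
-- })
--
-- _GENERIC_EXACT = frozenset({
--     "run", "running", "ride", "cycling", "swim", "swimming",
--     "activity", "workout", "exercise", "training",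
-- })
--
--
-- def is_generic_strava_title(title):
--     """Parse-then-lookup: split on the first space and do two direct set lookups
--     instead of enumerating every time-prefix/activity pair."""
--     if not title:
--         return True
--     title_lower = title.lower().strip()
--     head, _, tail = title_lower.partition(' ')
--     return (head in _TIME_PREFIXES and tail in _ACTIVITY_TYPES) \
--         or title_lower in _GENERIC_EXACT
-- ===== Notes on version B (the rewrite author's own statement) =====
-- stated objective: simpler
-- what changed: Replaces the 5x19 nested loop over all prefix/activity pairs with a single partition on the first space followed by two direct set lookups.
import Mathlib
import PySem

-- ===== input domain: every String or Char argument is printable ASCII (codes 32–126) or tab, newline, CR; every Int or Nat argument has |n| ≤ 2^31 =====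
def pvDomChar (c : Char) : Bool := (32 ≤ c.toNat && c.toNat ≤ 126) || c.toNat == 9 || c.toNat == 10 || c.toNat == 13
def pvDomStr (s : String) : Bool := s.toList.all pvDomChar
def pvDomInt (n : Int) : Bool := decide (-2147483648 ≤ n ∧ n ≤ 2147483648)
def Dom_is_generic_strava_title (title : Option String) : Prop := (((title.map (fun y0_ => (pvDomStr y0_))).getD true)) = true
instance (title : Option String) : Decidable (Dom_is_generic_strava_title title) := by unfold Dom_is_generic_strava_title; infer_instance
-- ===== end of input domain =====

-- B replaces A's nested loop over all 5×19 prefix/activity pairs by one partition on the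
-- first space followed by two direct membership lookups (objective: simpler).

-- ===== PORT A =====
def pvTimePrefixes : List String := ["morning", "lunch", "afternoon", "evening", "night"]

def pvActivityTypes : List String :=
  ["run", "ride", "swim", "walk", "hike", "workout",
   "weight training", "yoga", "crossfit", "elliptical",
   "stair stepper", "rowing", "ski", "snowboard",
   "ice skate", "kayak", "surf", "windsurf", "kitesurf"]

def pvGenericExact : List String :=
  ["run", "running", "ride", "cycling", "swim", "swimming",
   "activity", "workout", "exercise", "training"]

def is_generic_strava_title (title : Option String) : Bool :=
  match title with
  | none => true
  | some t =>
    if t = "" then true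
    else
      let title_lower := PySem.Str.strip (PySem.Str.lower t)
      -- the two nested for-loops with early return = nested List.any
      if pvTimePrefixes.any (fun prefix_ =>
           pvActivityTypes.any (fun activity =>
             title_lower == prefix_ ++ " " ++ activity)) then true
      else pvGenericExact.contains title_lower

-- ===== PORT B =====
-- str.partition(' ') : split at the FIRST space; none if no space occurs
def pvSplitSp : List Char → Option (List Char × List Char)
  | [] => none
  | c :: cs =>
    if c = ' ' then some ([], cs)
    else match pvSplitSp cs with
         | none => none
         | some (h, t) => some (c :: h, t)

def is_generic_strava_title_alt (title : Option String) : Bool :=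
  match title with
  | none => true
  | some t =>
    if t = "" then true
    else
      let title_lower := PySem.Str.strip (PySem.Str.lower t)
      let ht : String × String :=
        match pvSplitSp title_lower.toList with
        | some (h, tl) => (String.ofList h, String.ofList tl)
        | none => (title_lower, "")
      (pvTimePrefixes.contains ht.1 && pvActivityTypes.contains ht.2)
        || pvGenericExact.contains title_lower

-- ===== PRECONDITION & SPEC =====
def Spec_is_generic_strava_title (title : Option String) (out : Bool) : Prop := out = is_generic_strava_title_alt title
instance (title : Option String) (out : Bool) : Decidable (Spec_is_generic_strava_title title out) := by unfold Spec_is_generic_strava_title; infer_instance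

-- ===== CLAIM (what is proved, stated in full; the proofs are below) =====
def Claim_equal_is_generic_strava_title : Prop := ∀ (title : Option String), Dom_is_generic_strava_title title → Spec_is_generic_strava_title title (is_generic_strava_title title)

-- ===== LEMMAS AND PROOFS =====

lemma pvSplitSp_sound {s h t : List Char} (hs : pvSplitSp s = some (h, t)) :
    s = h ++ ' ' :: t := by
  induction s generalizing h t with
  | nil => simp [pvSplitSp] at hs
  | cons c cs ih =>
    by_cases hc : c = ' '
    · simp [pvSplitSp, hc] at hs
      simp [hc, ← hs.1, ← hs.2]
    · simp only [pvSplitSp, if_neg hc] at hs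
      cases hrec : pvSplitSp cs with
      | none => simp [hrec] at hs
      | some p =>
        obtain ⟨h', t'⟩ := p
        simp [hrec] at hs
        obtain ⟨rfl, rfl⟩ := hs
        simp [ih hrec]

lemma pvSplitSp_concat {h : List Char} (t : List Char) (hh : ' ' ∉ h) :
    pvSplitSp (h ++ ' ' :: t) = some (h, t) := by
  induction h with
  | nil => simp [pvSplitSp]
  | cons c cs ih =>
    have hc : c ≠ ' ' := fun e => hh (by simp [e])
    have hcs : ' ' ∉ cs := fun e => hh (by simp [e])
    simp [pvSplitSp, hc, ih hcs]

lemma pvSplitSp_none {s : List Char} (hs : pvSplitSp s = none) : ' ' ∉ s := by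
  induction s with
  | nil => simp
  | cons c cs ih =>
    by_cases hc : c = ' '
    · simp [pvSplitSp, hc] at hs
    · simp only [pvSplitSp, if_neg hc] at hs
      cases hrec : pvSplitSp cs with
      | none =>
        intro hmem
        rcases List.mem_cons.mp hmem with e | e
        · exact hc e.symm
        · exact ih hrec e
      | some p => obtain ⟨h', t'⟩ := p; simp [hrec] at hs

lemma pvNoSpacePrefix : ∀ p ∈ pvTimePrefixes, ' ' ∉ p.toList := by decide

-- the nested any over all pairs equals the partition-then-lookup computation
lemma pvKey (tl : String) :
    (pvTimePrefixes.any (fun prefix_ =>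
        pvActivityTypes.any (fun activity => tl == prefix_ ++ " " ++ activity)))
    = ((match pvSplitSp tl.toList with
        | some (h, t) => (String.ofList h, String.ofList t)
        | none => (tl, "")) |>
       (fun ht => pvTimePrefixes.contains ht.1 && pvActivityTypes.contains ht.2)) := by
  have heqs : ∀ (a b : String), (a == b) = true ↔ a.toList = b.toList := by
    intro a b
    constructor
    · intro h; rw [(beq_iff_eq).mp h]
    · intro h
      apply beq_iff_eq.mpr
      have := congrArg String.ofList h
      simpa [String.ofList_toList] using this
  cases hsp : pvSplitSp tl.toList with
  | none =>
    -- no space in tl, but every pair's pattern contains a space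
    have hns := pvSplitSp_none hsp
    have hact : pvActivityTypes.contains ("" : String) = false := by decide
    simp only [hact, Bool.and_false]
    rw [Bool.eq_false_iff]
    intro hex
    obtain ⟨p, hp, a, ha, heq⟩ := by
      simpa only [List.any_eq_true, Bool.and_eq_true] using hex
    have : tl.toList = (p ++ " " ++ a).toList := (heqs _ _).mp heq
    apply hns
    rw [this]
    simp [String.toList_append]
  | some pr =>
    obtain ⟨h, t⟩ := pr
    have hdec : tl.toList = h ++ ' ' :: t := pvSplitSp_sound hsp
    simp only
    rw [Bool.eq_iff_iff]
    simp only [List.any_eq_true, Bool.and_eq_true, List.contains_eq_mem, decide_eq_true_eq]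
    constructor
    · rintro ⟨p, hp, a, ha, heq⟩
      have htl : tl.toList = p.toList ++ ' ' :: a.toList := by
        rw [(heqs _ _).mp heq]; simp [String.toList_append]
      have : pvSplitSp tl.toList = some (p.toList, a.toList) := by
        rw [htl]; exact pvSplitSp_concat _ (pvNoSpacePrefix p hp)
      rw [hsp] at this
      obtain ⟨h1, h2⟩ : h = p.toList ∧ t = a.toList := by
        constructor <;> · injection this with e; cases e; rfl
      constructor
      · rw [h1, String.ofList_toList]; exact hp
      · rw [h2, String.ofList_toList]; exact ha
    · rintro ⟨hp, ha⟩
      refine ⟨String.ofList h, hp, String.ofList t, ha, ?_⟩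
      apply (heqs _ _).mpr
      simp [String.toList_append, String.toList_ofList, hdec]

-- ===== VERDICT (by name: the statement is the Claim_ definition above) =====
theorem is_generic_strava_title_spec : Claim_equal_is_generic_strava_title := by
  intro title _
  unfold Spec_is_generic_strava_title
  cases title with
  | none => rfl
  | some t =>
    unfold is_generic_strava_title is_generic_strava_title_alt
    by_cases ht : t = ""
    · simp [ht]
    · simp only [if_neg ht]
      rw [pvKey (PySem.Str.strip (PySem.Str.lower t))]
      cases hsp : pvSplitSp (PySem.Str.strip (PySem.Str.lower t)).toList with
      | none => simp
      | some pr =>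
        obtain ⟨h, tl⟩ := pr
        by_cases hb : (pvTimePrefixes.contains (String.ofList h) && pvActivityTypes.contains (String.ofList tl)) = true
        · simp
        · simp
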